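-- pv_equiv track=rewrite | github.com/Ashfaqzaheer/viraly | apps/ai/src/scripts.py | _scripts_too_similar
-- ===== SOURCE A (Python) =====
-- def _scripts_too_similar(scripts: list[dict]) -> bool:
--     if len(scripts) < 2:
--         return False
--     hooks = [s.get("hook", "").lower().strip() for s in scripts]
--     for i in range(len(hooks)):
--         words_i = set(hooks[i].split())
--         for j in range(i + 1, len(hooks)):
--             words_j = set(hooks[j].split())
--             if not words_i or not words_j:
--                 continue
--             overlap = len(words_i & words_j) / min(len(words_i), len(words_j))
--             if overlap > 0.5:
--                 return True
--     return False
-- ===== SOURCE B (Python) =====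
-- def _scripts_too_similar(scripts: list[dict]) -> bool:
--     if len(scripts) < 2:
--         return False
--     sets = [set(s.get("hook", "").lower().strip().split()) for s in scripts]
--     # inverted index: word -> list of script indices containing it (increasing)
--     index = {}
--     for i, ws in enumerate(sets):
--         for w in ws:
--             index[w] = index.get(w, []) + [i]
--     # candidate pairs: every (i, j), i < j, that shares at least one word
--     cands = []
--     for idxs in index.values():
--         for a in range(len(idxs)):
--             for b in range(a + 1, len(idxs)):
--                 cands.append((idxs[a], idxs[b]))
--     # pairs sharing no word have overlap 0 <= 0.5, so only candidates can fire
--     for i, j in cands: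
--         wi, wj = sets[i], sets[j]
--         if 2 * len(wi & wj) > min(len(wi), len(wj)):
--             return True
--     return False
-- ===== Notes on version B (the rewrite author's own statement) =====
-- stated objective: alternative
-- what changed: Replaces A's all-pairs nested loop (recomputing the inner word set for every pair and comparing a float ratio) with an inverted index word->script-indices built once over precomputed word sets; candidate pairs are generated only from co-occurrence lists of the index and the exact integer test 2*|intersection| > min(sizes) is checked per candidate, so pairs sharing no word are never compared.
import Mathlib
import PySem

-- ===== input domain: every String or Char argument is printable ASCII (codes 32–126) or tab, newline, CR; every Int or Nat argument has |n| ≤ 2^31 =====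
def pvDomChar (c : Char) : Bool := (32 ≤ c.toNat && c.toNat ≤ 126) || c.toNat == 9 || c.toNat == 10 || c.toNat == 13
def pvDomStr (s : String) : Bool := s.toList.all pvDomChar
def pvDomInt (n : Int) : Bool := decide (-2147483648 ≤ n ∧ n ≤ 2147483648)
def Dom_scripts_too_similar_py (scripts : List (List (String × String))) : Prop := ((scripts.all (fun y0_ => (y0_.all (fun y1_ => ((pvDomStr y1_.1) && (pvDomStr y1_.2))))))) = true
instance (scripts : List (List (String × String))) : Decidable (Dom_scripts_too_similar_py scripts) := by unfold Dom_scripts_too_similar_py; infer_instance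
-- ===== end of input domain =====

-- B replaces A's all-pairs nested scan (rebuilding the inner word set per pair) by an inverted
-- index word -> script indices: candidate pairs come only from co-occurrence lists, then the
-- exact integer test 2*|∩| > min(sizes) is applied per candidate. Same return value everywhere.

-- shared input decoding: s.get("hook", "").lower().strip()  (association-list dict, first match)
def pvHookStr (s : List (String × String)) : String :=
  PySem.Str.strip (PySem.Str.lower ((List.lookup "hook" s).getD ""))

-- ===== PORT A =====
-- the nested for-loops whose body is only `if …: return True` are ported as `any`;
-- the float test `len(wi & wj) / min(len(wi), len(wj)) > 0.5` is ported exactly as the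
-- equivalent integer comparison 2*|wi & wj| > min(|wi|, |wj|) (exact: both sides integers).
def scripts_too_similar_py (scripts : List (List (String × String))) : Bool :=
  if scripts.length < 2 then false
  else
    let hooks := scripts.map pvHookStr
    (PySem.List.pyRange 0 (hooks.length : Int)).any (fun i =>
      let wordsI : PySem.Set String := PySem.Set.ofList (PySem.Str.split₀ (PySem.List.pyGetD hooks i ""))
      (PySem.List.pyRange (i + 1) (hooks.length : Int)).any (fun j =>
        let wordsJ : PySem.Set String := PySem.Set.ofList (PySem.Str.split₀ (PySem.List.pyGetD hooks j ""))
        if wordsI.isEmpty || wordsJ.isEmpty then false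
        else decide (2 * (PySem.Set.inter wordsI wordsJ).length > min wordsI.length wordsJ.length)))

-- ===== PORT B =====
def pvHookSet (s : List (String × String)) : PySem.Set String :=
  PySem.Set.ofList (PySem.Str.split₀ (pvHookStr s))

def scripts_too_similar_py_alt (scripts : List (List (String × String))) : Bool :=
  if scripts.length < 2 then false
  else
    let sets := scripts.map pvHookSet
    -- index[w] = index.get(w, []) + [i]
    let index : PySem.Dict String (List Int) :=
      (PySem.List.enumerate sets).foldl
        (fun d p => p.2.foldl (fun d w => d.insert w (d.getD w [] ++ [p.1])) d) PySem.Dict.empty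
    -- cands.append((idxs[a], idxs[b])) for a < b
    let cands : List (Int × Int) :=
      index.values.foldl (fun c idxs =>
        (PySem.List.pyRange 0 (idxs.length : Int)).foldl (fun c a =>
          (PySem.List.pyRange (a + 1) (idxs.length : Int)).foldl (fun c b =>
            c ++ [(PySem.List.pyGetD idxs a 0, PySem.List.pyGetD idxs b 0)]) c) c) []
    -- `for i, j in cands: if …: return True` ported as `any` (order-independent)
    cands.any (fun ij =>
      let wi := PySem.List.pyGetD sets ij.1 []
      let wj := PySem.List.pyGetD sets ij.2 []
      decide (2 * (PySem.Set.inter wi wj).length > min wi.length wj.length))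

-- ===== PRECONDITION & SPEC =====
def Spec_scripts_too_similar_py (scripts : List (List (String × String))) (out : Bool) : Prop := out = scripts_too_similar_py_alt scripts
instance (scripts : List (List (String × String))) (out : Bool) : Decidable (Spec_scripts_too_similar_py scripts out) := by unfold Spec_scripts_too_similar_py; infer_instance

-- ===== CLAIM (what is proved, stated in full; the proofs are below) =====
def Claim_equal_scripts_too_similar_py : Prop := ∀ (scripts : List (List (String × String))), Dom_scripts_too_similar_py scripts → Spec_scripts_too_similar_py scripts (scripts_too_similar_py scripts)

-- ===== LEMMAS AND PROOFS =====

-- similarity of two word sets, as both ports test it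
def pvSim (u v : PySem.Set String) : Prop :=
  2 * (PySem.Set.inter u v).length > min u.length v.length

def pvSets (scripts : List (List (String × String))) : List (PySem.Set String) :=
  scripts.map pvHookSet

def pvGood (scripts : List (List (String × String))) (i j : Nat) : Prop :=
  pvSim ((pvSets scripts).getD i []) ((pvSets scripts).getD j [])

lemma pvSim_mem {u v : PySem.Set String} (h : pvSim u v) : ∃ w, w ∈ u ∧ w ∈ v := by
  unfold pvSim at h
  cases hi : PySem.Set.inter u v with
  | nil => rw [hi] at h; simp at h
  | cons w t =>
    have hw : w ∈ PySem.Set.inter u v := by rw [hi]; exact List.mem_cons_self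
    exact ⟨w, (PySem.Set.mem_inter u v w).1 hw⟩

lemma pvSets_getD (scripts : List (List (String × String))) (k : Nat) (hk : k < scripts.length) :
    (pvSets scripts).getD k [] =
    PySem.Set.ofList (PySem.Str.split₀ (PySem.List.pyGetD (scripts.map pvHookStr) (k : Int) "")) := by
  rw [PySem.List.pyGetD_natCast]
  rw [List.getD_eq_getElem _ _ (by simpa [pvSets] using hk),
      List.getD_eq_getElem _ _ (by simpa using hk)]
  simp [pvSets, pvHookSet]

-- ===== A-side characterisation =====
lemma A_iff (scripts : List (List (String × String))) (h : ¬ scripts.length < 2) :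
    scripts_too_similar_py scripts = true ↔
    ∃ i j : Nat, i < j ∧ j < scripts.length ∧ pvGood scripts i j := by
  unfold scripts_too_similar_py
  rw [if_neg h]
  simp only [List.any_eq_true, PySem.List.mem_pyRange_one, List.length_map]
  constructor
  · rintro ⟨i, ⟨hi0, hin⟩, j, ⟨hij, hjn⟩, hbody⟩
    have hj0 : 0 ≤ j := by omega
    refine ⟨i.toNat, j.toNat, by omega, by omega, ?_⟩
    rw [← Int.toNat_of_nonneg hi0, ← Int.toNat_of_nonneg hj0] at hbody
    unfold pvGood
    rw [pvSets_getD scripts i.toNat (by omega), pvSets_getD scripts j.toNat (by omega)]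
    split at hbody
    · exact absurd hbody (by simp)
    · unfold pvSim
      exact of_decide_eq_true hbody
  · rintro ⟨i, j, hij, hjn, hgood⟩
    unfold pvGood at hgood
    rw [pvSets_getD scripts i (by omega), pvSets_getD scripts j hjn] at hgood
    refine ⟨(i : Int), ⟨by omega, by omega⟩, (j : Int), ⟨by omega, by omega⟩, ?_⟩
    obtain ⟨w, hwI, hwJ⟩ := pvSim_mem hgood
    rw [if_neg]
    · unfold pvSim at hgood
      exact decide_eq_true hgood
    · simp only [Bool.or_eq_true, List.isEmpty_iff, not_or]
      exact ⟨List.ne_nil_of_mem hwI, List.ne_nil_of_mem hwJ⟩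

-- ===== B-side characterisation =====

-- the word's index list: all i with w ∈ sets[i], increasing
def pvIdx (sets : List (PySem.Set String)) (w : String) : List Int :=
  ((PySem.List.enumerate sets).filter (fun p => p.2.contains w)).map (·.1)

def pvStep (d : PySem.Dict String (List Int)) (p : Int × PySem.Set String) :
    PySem.Dict String (List Int) :=
  p.2.foldl (fun d w => d.insert w (d.getD w [] ++ [p.1])) d

lemma pvInner_getD (ws : List String) (hnd : ws.Nodup) (i : Int)
    (d : PySem.Dict String (List Int)) (w : String) :
    (ws.foldl (fun d w => d.insert w (d.getD w [] ++ [i])) d).getD w []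
      = d.getD w [] ++ (if w ∈ ws then [i] else []) := by
  induction ws generalizing d with
  | nil => simp
  | cons w' rest ih =>
    obtain ⟨hw', hrest⟩ := List.nodup_cons.mp hnd
    simp only [List.foldl_cons]
    rw [ih hrest]
    rw [PySem.Dict.getD_insert]
    by_cases hww : w = w'
    · subst hww
      rw [if_pos rfl, if_neg hw', if_pos (List.mem_cons_self)]
      simp
    · rw [if_neg hww]
      by_cases hm : w ∈ rest
      · rw [if_pos hm, if_pos (List.mem_cons_of_mem _ hm)]
      · rw [if_neg hm, if_neg (by simp [hww, hm])]

lemma pvOuter_getD (ps : List (Int × PySem.Set String)) (hps : ∀ p ∈ ps, p.2.Nodup)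
    (d : PySem.Dict String (List Int)) (w : String) :
    (ps.foldl pvStep d).getD w []
      = d.getD w [] ++ (ps.filter (fun p => p.2.contains w)).map (·.1) := by
  induction ps generalizing d with
  | nil => simp
  | cons p rest ih =>
    simp only [List.foldl_cons]
    rw [ih (fun q hq => hps q (List.mem_cons_of_mem _ hq))]
    unfold pvStep
    rw [pvInner_getD p.2 (hps p List.mem_cons_self) p.1]
    by_cases hw : w ∈ p.2
    · rw [if_pos hw, List.filter_cons_of_pos (by simpa using hw)]
      simp
    · rw [if_neg hw, List.filter_cons_of_neg (by simpa using hw)]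
      simp

lemma pvOuter_keys_nodup (ps : List (Int × PySem.Set String))
    (d : PySem.Dict String (List Int)) (h : d.keys.Nodup) :
    (ps.foldl pvStep d).keys.Nodup := by
  induction ps generalizing d with
  | nil => simpa
  | cons p rest ih =>
    simp only [List.foldl_cons]
    exact ih _ (PySem.Dict.nodup_keys_foldl_insert p.2 (fun d w => d.getD w [] ++ [p.1]) d h)

lemma pvIdx_pairwise (sets : List (PySem.Set String)) (w : String) :
    (pvIdx sets w).Pairwise (· < ·) := by
  unfold pvIdx
  rw [List.pairwise_map]
  exact List.Pairwise.sublist List.filter_sublist (PySem.List.pairwise_lt_enumerate sets 0)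

lemma pvIdx_mem (sets : List (PySem.Set String)) (w : String) (i : Int) :
    i ∈ pvIdx sets w ↔ ∃ k : Nat, ∃ hk : k < sets.length, i = (k : Int) ∧ w ∈ sets[k] := by
  unfold pvIdx
  simp only [List.mem_map, List.mem_filter, PySem.List.mem_enumerate_iff]
  constructor
  · rintro ⟨p, ⟨⟨k, hk, rfl⟩, hc⟩, rfl⟩
    exact ⟨k, hk, by simp, by simpa [List.contains_iff_mem] using hc⟩
  · rintro ⟨k, hk, rfl, hw⟩
    exact ⟨((k : Int), sets[k]), ⟨⟨k, hk, by simp⟩, by simpa [List.contains_iff_mem] using hw⟩, rfl⟩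

-- the index dict of port B, characterised
lemma pvIndex_getD (sets : List (PySem.Set String))
    (hsets : ∀ s ∈ sets, List.Nodup s) (w : String) :
    ((PySem.List.enumerate sets).foldl
        (fun d p => p.2.foldl (fun d w => d.insert w (d.getD w [] ++ [p.1])) d)
        PySem.Dict.empty).getD w [] = pvIdx sets w := by
  have h := pvOuter_getD (PySem.List.enumerate sets)
    (fun p hp => by
      obtain ⟨k, hk, rfl⟩ := (PySem.List.mem_enumerate_iff sets 0 p).1 hp
      exact hsets _ (List.getElem_mem hk))
    PySem.Dict.empty w
  unfold pvStep at h
  rw [h]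
  simp [pvIdx]

lemma pvCands_mem (values : List (List Int)) (ij : Int × Int) :
    ij ∈ values.foldl (fun c idxs =>
        (PySem.List.pyRange 0 (idxs.length : Int)).foldl (fun c a =>
          (PySem.List.pyRange (a + 1) (idxs.length : Int)).foldl (fun c b =>
            c ++ [(PySem.List.pyGetD idxs a 0, PySem.List.pyGetD idxs b 0)]) c) c) []
      ↔ ∃ idxs ∈ values, ∃ a b : Int, (0 ≤ a ∧ a < b ∧ b < (idxs.length : Int)) ∧
          ij = (PySem.List.pyGetD idxs a 0, PySem.List.pyGetD idxs b 0) := by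
  simp only [PySem.List.foldl_append_singleton_eq_map, PySem.List.foldl_append_eq_flatMap]
  simp only [List.nil_append, List.mem_flatMap, List.mem_map, PySem.List.mem_pyRange_one]
  constructor
  · rintro ⟨idxs, hidxs, a, ⟨ha0, han⟩, b, ⟨hab, hbn⟩, rfl⟩
    exact ⟨idxs, hidxs, a, b, ⟨ha0, by omega, hbn⟩, rfl⟩
  · rintro ⟨idxs, hidxs, a, b, ⟨ha0, hab, hbn⟩, rfl⟩
    exact ⟨idxs, hidxs, a, ⟨ha0, by omega⟩, b, ⟨by omega, hbn⟩, rfl⟩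

lemma B_iff (scripts : List (List (String × String))) (h : ¬ scripts.length < 2) :
    scripts_too_similar_py_alt scripts = true ↔
    ∃ i j : Nat, i < j ∧ j < scripts.length ∧ pvGood scripts i j := by
  unfold scripts_too_similar_py_alt
  rw [if_neg h]
  have hsetsnd : ∀ s ∈ scripts.map pvHookSet, List.Nodup s := by
    intro s hs
    obtain ⟨t, _, rfl⟩ := List.mem_map.mp hs
    exact PySem.Set.nodup_ofList _
  have hkeysnd : ((PySem.List.enumerate (scripts.map pvHookSet)).foldl
      (fun d p => p.2.foldl (fun d w => d.insert w (d.getD w [] ++ [p.1])) d)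
      PySem.Dict.empty).keys.Nodup := by
    have := pvOuter_keys_nodup (PySem.List.enumerate (scripts.map pvHookSet))
      PySem.Dict.empty PySem.Dict.nodup_keys_empty
    simpa [pvStep] using this
  set sets := scripts.map pvHookSet with hsets
  set index := (PySem.List.enumerate sets).foldl
      (fun d p => p.2.foldl (fun d w => d.insert w (d.getD w [] ++ [p.1])) d)
      PySem.Dict.empty with hindex
  have hvals : ∀ idxs ∈ index.values, ∃ w, idxs = pvIdx sets w := by
    intro idxs hidxs
    rw [PySem.Dict.values_eq_map_keys index hkeysnd []] at hidxs
    obtain ⟨w, _, rfl⟩ := List.mem_map.mp hidxs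
    exact ⟨w, pvIndex_getD sets hsetsnd w⟩
  have hvals' : ∀ w : String, pvIdx sets w ≠ [] → pvIdx sets w ∈ index.values := by
    intro w hne
    have hc : index.contains w = true := by
      by_contra hc
      have := PySem.Dict.getD_of_not_contains index ([] : List Int) (Bool.eq_false_iff.mpr hc)
      rw [pvIndex_getD sets hsetsnd w] at this
      exact hne this
    rw [PySem.Dict.values_eq_map_keys index hkeysnd []]
    refine List.mem_map.mpr ⟨w, (PySem.Dict.contains_iff_mem_keys index w).1 hc, ?_⟩
    exact pvIndex_getD sets hsetsnd w
  have hlen : sets.length = scripts.length := by simp [hsets]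
  simp only [List.any_eq_true, pvCands_mem]
  constructor
  · rintro ⟨ij, ⟨idxs, hidxs, a, b, ⟨ha0, hab, hbn⟩, rfl⟩, hcond⟩
    obtain ⟨w, rfl⟩ := hvals idxs hidxs
    have hb0 : (0:Int) ≤ b := by omega
    have hblen : b < ((pvIdx sets w).length : Int) := hbn
    have halen : a < ((pvIdx sets w).length : Int) := by omega
    dsimp only at hcond
    rw [PySem.List.pyGetD_eq_getElem _ _ ha0 halen,
        PySem.List.pyGetD_eq_getElem _ _ hb0 hblen] at hcond
    have hmem_a := (pvIdx_mem sets w _).1 (List.getElem_mem (l := pvIdx sets w) (n := a.toNat) (by omega))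
    have hmem_b := (pvIdx_mem sets w _).1 (List.getElem_mem (l := pvIdx sets w) (n := b.toNat) (by omega))
    obtain ⟨k, hk, hka, _⟩ := hmem_a
    obtain ⟨l, hl, hlb, _⟩ := hmem_b
    have hlt := (List.pairwise_iff_getElem.mp (pvIdx_pairwise sets w)) a.toNat b.toNat
        (by omega) (by omega) (by omega)
    refine ⟨k, l, ?_, by omega, ?_⟩
    · rw [hka, hlb] at hlt
      exact_mod_cast hlt
    · unfold pvGood pvSets pvSim
      rw [← hsets]
      rw [hka, hlb] at hcond
      rw [PySem.List.pyGetD_natCast, PySem.List.pyGetD_natCast] at hcond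
      exact of_decide_eq_true hcond
  · rintro ⟨i, j, hij, hjn, hgood⟩
    unfold pvGood pvSets at hgood
    rw [← hsets] at hgood
    obtain ⟨w, hwI, hwJ⟩ := pvSim_mem hgood
    have hiS : i < sets.length := by omega
    have hjS : j < sets.length := by omega
    rw [List.getD_eq_getElem _ _ hiS] at hwI
    rw [List.getD_eq_getElem _ _ hjS] at hwJ
    have hiIdx : (i : Int) ∈ pvIdx sets w := (pvIdx_mem sets w _).2 ⟨i, hiS, rfl, hwI⟩
    have hjIdx : (j : Int) ∈ pvIdx sets w := (pvIdx_mem sets w _).2 ⟨j, hjS, rfl, hwJ⟩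
    have hmem : pvIdx sets w ∈ index.values := hvals' w (List.ne_nil_of_mem hiIdx)
    obtain ⟨a, ha, haeq⟩ := List.mem_iff_getElem.mp hiIdx
    obtain ⟨b, hb, hbeq⟩ := List.mem_iff_getElem.mp hjIdx
    have hpw := List.pairwise_iff_getElem.mp (pvIdx_pairwise sets w)
    have hab : a < b := by
      rcases Nat.lt_trichotomy a b with hlt | heq | hgt
      · exact hlt
      · exfalso
        subst heq
        rw [haeq] at hbeq
        have hijeq : i = j := by exact_mod_cast hbeq
        omega
      · exfalso
        have := hpw b a hb ha hgt
        rw [haeq, hbeq] at this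
        have : (j : Int) < (i : Int) := this
        omega
    refine ⟨((i : Int), (j : Int)), ⟨pvIdx sets w, hmem, (a : Int), (b : Int),
      ⟨by omega, by exact_mod_cast hab, by exact_mod_cast hb⟩, ?_⟩, ?_⟩
    · rw [PySem.List.pyGetD_natCast, PySem.List.pyGetD_natCast,
          List.getD_eq_getElem _ _ ha, List.getD_eq_getElem _ _ hb, haeq, hbeq]
    · simp only [PySem.List.pyGetD_natCast]
      rw [List.getD_eq_getElem _ _ hiS, List.getD_eq_getElem _ _ hjS]
      rw [List.getD_eq_getElem _ _ hiS, List.getD_eq_getElem _ _ hjS] at hgood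
      unfold pvSim at hgood
      exact decide_eq_true hgood

-- ===== VERDICT (by name: the statement is the Claim_ definition above) =====
theorem scripts_too_similar_py_spec : Claim_equal_scripts_too_similar_py := by
  intro scripts _
  unfold Spec_scripts_too_similar_py
  by_cases h : scripts.length < 2
  · unfold scripts_too_similar_py scripts_too_similar_py_alt
    rw [if_pos h, if_pos h]
  · have := (A_iff scripts h).trans (B_iff scripts h).symm
    exact Bool.coe_iff_coe.mp (by simpa using this)
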